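-- pv_equiv track=rewrite | github.com/shinimaro/TwitUp | parsing/main_checkings/re_checking_executions/elements_control.py | _search_by_slice
-- ===== SOURCE A (Python) =====
-- def _search_by_slice(users: list[str], upper_cut: list[str], lower_cut: list[str]) -> bool:
--     """Поиск по срезу"""
--     upper_counter, lower_counter = 0, 0
--     for user in users:
--         upper_counter += 1 if user in upper_cut else 0
--         lower_counter += 1 if user in lower_cut else 0
--         if upper_counter > 0 and lower_counter > 0:  # Если мы нашли верхний и нижний срез
--             return False
--         elif lower_counter > 1:  # Если нашли только нижний срез
--             return False
--     return True  # Если срез не найден или недостаточно данных для вынесения решения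
-- ===== SOURCE B (Python) =====
-- def _search_by_slice(users: list[str], upper_cut: list[str], lower_cut: list[str]) -> bool:
--     up = set(upper_cut)
--     lo = set(lower_cut)
--     u = sum(1 for user in users if user in up)
--     l = sum(1 for user in users if user in lo)
--     return l == 0 or (l == 1 and u == 0)
-- ===== Notes on version B (the rewrite author's own statement) =====
-- stated objective: simpler
-- what changed: Replaces the fused short-circuiting loop with two running counters by two independent full counts over sets built once, plus one closed boolean decision (l == 0 or (l == 1 and u == 0)); correct because the counters are monotone, so the early exit never changes the final verdict.
import Mathlib
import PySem

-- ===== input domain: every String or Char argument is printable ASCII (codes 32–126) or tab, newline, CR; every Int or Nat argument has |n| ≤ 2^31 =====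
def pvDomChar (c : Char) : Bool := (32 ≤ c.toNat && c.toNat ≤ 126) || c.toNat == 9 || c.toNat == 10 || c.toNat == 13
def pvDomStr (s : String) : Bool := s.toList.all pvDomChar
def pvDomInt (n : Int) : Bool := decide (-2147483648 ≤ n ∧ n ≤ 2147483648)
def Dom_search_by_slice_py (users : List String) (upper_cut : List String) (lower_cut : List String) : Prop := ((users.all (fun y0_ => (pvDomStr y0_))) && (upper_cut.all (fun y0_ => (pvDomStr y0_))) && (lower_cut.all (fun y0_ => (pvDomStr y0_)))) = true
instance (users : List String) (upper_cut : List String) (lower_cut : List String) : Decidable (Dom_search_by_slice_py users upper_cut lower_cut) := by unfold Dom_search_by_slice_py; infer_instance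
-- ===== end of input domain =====

-- B replaces A's fused short-circuiting counter loop by two independent full counts and one
-- closed boolean decision (simpler); equivalent because the counters are monotone.


-- ===== PORT A =====
-- A's for-loop over users with its two running counters and early returns
def sbsLoop (upper_cut lower_cut : List String) (uc lc : Int) : List String → Bool
  | [] => true
  | user :: rest =>
    let uc' := uc + (if user ∈ upper_cut then 1 else 0)
    let lc' := lc + (if user ∈ lower_cut then 1 else 0)
    if uc' > 0 ∧ lc' > 0 then false
    else if lc' > 1 then false
    else sbsLoop upper_cut lower_cut uc' lc' rest

def search_by_slice_py (users : List String) (upper_cut : List String) (lower_cut : List String) : Bool :=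
  sbsLoop upper_cut lower_cut 0 0 users

-- ===== PORT B =====
def search_by_slice_py_alt (users : List String) (upper_cut : List String) (lower_cut : List String) : Bool :=
  let up : PySem.Set String := PySem.Set.ofList upper_cut
  let lo : PySem.Set String := PySem.Set.ofList lower_cut
  let u : Int := (users.countP (fun x => decide (x ∈ up)) : Nat)
  let l : Int := (users.countP (fun x => decide (x ∈ lo)) : Nat)
  decide (l = 0 ∨ (l = 1 ∧ u = 0))

-- ===== PRECONDITION & SPEC =====
def Spec_search_by_slice_py (users : List String) (upper_cut : List String) (lower_cut : List String) (out : Bool) : Prop := out = search_by_slice_py_alt users upper_cut lower_cut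
instance (users : List String) (upper_cut : List String) (lower_cut : List String) (out : Bool) : Decidable (Spec_search_by_slice_py users upper_cut lower_cut out) := by unfold Spec_search_by_slice_py; infer_instance

-- ===== CLAIM (what is proved, stated in full; the proofs are below) =====
def Claim_equal_search_by_slice_py : Prop := ∀ (users : List String) (upper_cut : List String) (lower_cut : List String), Dom_search_by_slice_py users upper_cut lower_cut → Spec_search_by_slice_py users upper_cut lower_cut (search_by_slice_py users upper_cut lower_cut)

-- ===== LEMMAS AND PROOFS =====
-- The loop started in a non-violating state (uc, lc) decides whether the FINAL counts
-- violate the crossover condition: the counters are monotone, so early exit is harmless.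
lemma sbsLoop_eq (upper_cut lower_cut : List String) :
    ∀ (us : List String) (uc lc : Int), 0 ≤ uc → 0 ≤ lc →
    ¬((uc > 0 ∧ lc > 0) ∨ lc > 1) →
    sbsLoop upper_cut lower_cut uc lc us =
      decide (¬(((uc + (us.countP (fun x => decide (x ∈ upper_cut)) : Int) > 0) ∧
                 (lc + (us.countP (fun x => decide (x ∈ lower_cut)) : Int) > 0)) ∨
                lc + (us.countP (fun x => decide (x ∈ lower_cut)) : Int) > 1)) := by
  intro us
  induction us with
  | nil =>
    intro uc lc _ _ h
    simp only [sbsLoop, List.countP_nil, Nat.cast_zero, add_zero]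
    symm; rw [decide_eq_true_eq]; exact h
  | cons user rest ih =>
    intro uc lc huc hlc h
    have hcu : (0 : Int) ≤ (rest.countP (fun x => decide (x ∈ upper_cut)) : Int) :=
      Int.natCast_nonneg _
    have hcl : (0 : Int) ≤ (rest.countP (fun x => decide (x ∈ lower_cut)) : Int) :=
      Int.natCast_nonneg _
    simp only [sbsLoop, List.countP_cons]
    by_cases hu : user ∈ upper_cut <;> by_cases hl : user ∈ lower_cut <;>
      simp only [hu, hl, decide_true, decide_false, if_true, if_false] <;>
      split_ifs with h1 h2 <;>
      first
        | (rw [ih _ _ (by omega) (by omega) (by omega)]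
           simp only [decide_eq_decide]; push_cast; omega)
        | (symm; rw [decide_eq_false_iff_not]; push_cast; omega)
        | exact ‹False›.elim

-- ===== VERDICT (by name: the statement is the Claim_ definition above) =====
theorem search_by_slice_py_spec : Claim_equal_search_by_slice_py := by
  intro users upper_cut lower_cut _
  unfold Spec_search_by_slice_py search_by_slice_py search_by_slice_py_alt
  simp only [PySem.Set.mem_ofList]
  rw [sbsLoop_eq upper_cut lower_cut users 0 0 le_rfl le_rfl (by omega)]
  simp only [decide_eq_decide]
  have hcu : (0 : Int) ≤ (users.countP (fun x => decide (x ∈ upper_cut)) : Int) := Int.natCast_nonneg _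
  have hcl : (0 : Int) ≤ (users.countP (fun x => decide (x ∈ lower_cut)) : Int) := Int.natCast_nonneg _
  omega
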